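-- pv_equiv track=rewrite | github.com/chuqianyiding/blankmath | backend/generate.py | horizontalExpand
-- ===== SOURCE A (Python) =====
-- def horizontalExpand(text):
--     result=""
--     # Remove all spaces, I will add them back
--     text = text.replace(" ", "")
--     for index, char in enumerate(text):
--         if char in ['+','-', '*', '/']:
--             result = result + '  ' + char + '  '
--         elif char == '=':
--             result = result + '   =   '
--         elif char == 'x':
--             result = result + '___'
--         else:
--             result = result + char
--     result = result.replace('*', '×')
--     result = result.replace('/', '÷')
--     return result
-- ===== SOURCE B (Python) =====
-- def horizontalExpand(text):
--     text = text.replace(' ', '')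
--     return (text.replace('+', '  +  ')
--                 .replace('-', '  -  ')
--                 .replace('*', '  \u00d7  ')
--                 .replace('/', '  \u00f7  ')
--                 .replace('=', '   =   ')
--                 .replace('x', '___'))
-- ===== Notes on version B (the rewrite author's own statement) =====
-- stated objective: idiomatic
-- what changed: Replaces A's indexed per-character loop (Python-level string concatenation plus two later fix-up replaces of '*' and '/') by a single chain of global C-level str.replace calls that emit each symbol's final spaced form directly.
import Mathlib
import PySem

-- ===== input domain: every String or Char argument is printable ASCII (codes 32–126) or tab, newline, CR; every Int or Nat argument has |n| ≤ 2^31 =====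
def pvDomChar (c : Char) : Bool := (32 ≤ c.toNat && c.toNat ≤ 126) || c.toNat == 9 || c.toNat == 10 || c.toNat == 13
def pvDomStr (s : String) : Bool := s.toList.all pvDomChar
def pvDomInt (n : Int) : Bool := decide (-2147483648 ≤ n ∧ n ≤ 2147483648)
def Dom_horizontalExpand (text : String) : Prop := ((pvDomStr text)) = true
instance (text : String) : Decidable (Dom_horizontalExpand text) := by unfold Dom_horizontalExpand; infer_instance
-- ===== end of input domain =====

-- B replaces A's indexed per-character loop (plus two later fix-up replaces) by a chain of
-- global str.replace calls that emit each symbol's final spaced form directly: simpler/idiomatic.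

-- ===== PORT A =====
/-- The body of A's `for index, char in enumerate(text)` loop (index unused by the body). -/
def pvBodyA (result : String) (char : Char) : String :=
  if char ∈ ['+', '-', '*', '/'] then
    result ++ "  " ++ String.ofList [char] ++ "  "
  else if char = '=' then
    result ++ "   =   "
  else if char = 'x' then
    result ++ "___"
  else
    result ++ String.ofList [char]

def horizontalExpand (text : String) : String :=
  let text := PySem.Str.replace text " " ""
  let result :=
    (PySem.List.enumerate text.toList).foldl (fun result ic => pvBodyA result ic.2) ""
  let result := PySem.Str.replace result "*" "×"
  PySem.Str.replace result "/" "÷"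

-- ===== PORT B =====
def horizontalExpand_alt (text : String) : String :=
  PySem.Str.replace
    (PySem.Str.replace
      (PySem.Str.replace
        (PySem.Str.replace
          (PySem.Str.replace
            (PySem.Str.replace
              (PySem.Str.replace text " " "")
              "+" "  +  ")
            "-" "  -  ")
          "*" "  ×  ")
        "/" "  ÷  ")
      "=" "   =   ")
    "x" "___"

-- ===== PRECONDITION & SPEC =====
def Spec_horizontalExpand (text : String) (out : String) : Prop := out = horizontalExpand_alt text
instance (text : String) (out : String) : Decidable (Spec_horizontalExpand text out) := by unfold Spec_horizontalExpand; infer_instance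

-- ===== CLAIM (what is proved, stated in full; the proofs are below) =====
def Claim_equal_horizontalExpand : Prop := ∀ (text : String), Dom_horizontalExpand text → Spec_horizontalExpand text (horizontalExpand text)

-- ===== LEMMAS AND PROOFS =====

/-- Substituting one character: the body of a single-char `str.replace`. -/
def pvSub (c : Char) (new : List Char) (d : Char) : List Char :=
  if d = c then new else [d]

theorem pvReplace_go_single (c : Char) (new : List Char) :
    ∀ (l : List Char) (fuel : Nat) (acc : List Char), l.length ≤ fuel →
      PySem.Chars.replace.go [c] new fuel l acc = acc.reverse ++ l.flatMap (pvSub c new) := by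
  intro l
  induction l with
  | nil =>
    intro fuel acc _
    cases fuel <;> simp [PySem.Chars.replace.go]
  | cons d t ih =>
    intro fuel acc hlen
    cases fuel with
    | zero => simp at hlen
    | succ fuel =>
      by_cases hd : d = c
      · subst hd
        have hp : [d].isPrefixOf (d :: t) = true := by simp [List.isPrefixOf]
        simp only [PySem.Chars.replace.go, hp, if_pos]
        rw [show List.drop [d].length (d :: t) = t from rfl]
        rw [ih fuel (new.reverse ++ acc) (by simpa using Nat.le_of_succ_le_succ hlen)]
        simp [pvSub]
      · have hp : [c].isPrefixOf (d :: t) = false := by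
          simp [List.isPrefixOf]; exact fun h => hd h.symm
        simp only [PySem.Chars.replace.go, hp, Bool.false_eq_true, if_false]
        rw [ih fuel (d :: acc) (by simpa using Nat.le_of_succ_le_succ hlen)]
        simp [pvSub, hd]

theorem pvReplace_single (c : Char) (new l : List Char) :
    PySem.Chars.replace l [c] new = l.flatMap (pvSub c new) := by
  rw [PySem.Chars.replace]
  simp only [List.isEmpty_cons, if_false, Bool.false_eq_true]
  exact (pvReplace_go_single c new l l.length [] (le_refl _)).trans (by simp)

theorem pvStrReplace_single (c : Char) (new : List Char) (s : String) :
    (PySem.Str.replace s (String.ofList [c]) (String.ofList new)).toList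
      = s.toList.flatMap (pvSub c new) := by
  rw [PySem.Str.toList_replace]
  simp [pvReplace_single]

/-- A's per-character piece, as a list of characters. -/
def pvPieceA (char : Char) : List Char :=
  if char ∈ ['+', '-', '*', '/'] then ' ' :: ' ' :: char :: [' ', ' ']
  else if char = '=' then "   =   ".toList
  else if char = 'x' then "___".toList
  else [char]

theorem pvFoldA_toList (l : List Char) (acc : String) :
    (l.foldl pvBodyA acc).toList = acc.toList ++ l.flatMap pvPieceA := by
  induction l generalizing acc with
  | nil => simp
  | cons d t ih =>
    simp only [List.foldl_cons, List.flatMap_cons, ih]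
    unfold pvBodyA pvPieceA
    split_ifs <;> simp_all

theorem pvEnumFold (l : List Char) (s : Int) (acc : String)
    (g : String → Char → String) :
    (PySem.List.enumerate l s).foldl (fun r ic => g r ic.2) acc
      = l.foldl g acc := by
  induction l generalizing s acc with
  | nil => simp [PySem.List.enumerate_nil]
  | cons d t ih => simp [PySem.List.enumerate_cons, ih]

set_option maxHeartbeats 1000000 in
theorem horizontalExpand_spec : Claim_equal_horizontalExpand := by
  unfold Claim_equal_horizontalExpand Spec_horizontalExpand
  intro text _
  rw [← String.toList_inj]
  unfold horizontalExpand horizontalExpand_alt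
  have h (c : Char) (new : List Char) (s : String) :
      (PySem.Str.replace s (String.ofList [c]) (String.ofList new)).toList
        = s.toList.flatMap (pvSub c new) := pvStrReplace_single c new s
  rw [show ("*" : String) = String.ofList ['*'] from rfl,
      show ("×" : String) = String.ofList ['×'] from rfl,
      show ("/" : String) = String.ofList ['/'] from rfl,
      show ("÷" : String) = String.ofList ['÷'] from rfl,
      show ("+" : String) = String.ofList ['+'] from rfl,
      show ("  +  " : String) = String.ofList "  +  ".toList from rfl,
      show ("-" : String) = String.ofList ['-'] from rfl,
      show ("  -  " : String) = String.ofList "  -  ".toList from rfl,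
      show ("  ×  " : String) = String.ofList "  ×  ".toList from rfl,
      show ("  ÷  " : String) = String.ofList "  ÷  ".toList from rfl,
      show ("=" : String) = String.ofList ['='] from rfl,
      show ("   =   " : String) = String.ofList "   =   ".toList from rfl,
      show ("x" : String) = String.ofList ['x'] from rfl,
      show ("___" : String) = String.ofList "___".toList from rfl,
      show (" " : String) = String.ofList [' '] from rfl,
      show ("" : String) = String.ofList [] from rfl]
  rw [h '/' ['÷'], h '*' ['×'], pvEnumFold, pvFoldA_toList]
  rw [h 'x', h '=', h '/', h '*', h '-', h '+', h ' ' []]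
  simp only [List.flatMap_assoc, String.toList_ofList, List.nil_append]
  congr 1
  funext d
  by_cases h0 : d = ' ' <;> by_cases h1 : d = '+' <;> by_cases h2 : d = '-' <;>
    by_cases h3 : d = '*' <;> by_cases h4 : d = '/' <;> by_cases h5 : d = '=' <;>
    by_cases h6 : d = 'x' <;>
    simp_all [pvPieceA, pvSub]
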